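-- pv_equiv track=rewrite | github.com/ArthurWish/m6a_Project | scripts/dataset/generate_rnafold_bpp_cache.py | _apply_modification
-- ===== SOURCE A (Python) =====
-- def _apply_modification(seq: str, m6a_positions: list[int]) -> str:
--     chars = list(seq)
--     for pos in m6a_positions:
--         if pos < 0 or pos >= len(chars):
--             continue
--         if chars[pos] == "A":
--             chars[pos] = "6"
--     return "".join(chars)
-- ===== SOURCE B (Python) =====
-- def _apply_modification(seq: str, m6a_positions: list[int]) -> str:
--     mods = set(m6a_positions)
--     return "".join("6" if i in mods and c == "A" else c for i, c in enumerate(seq))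
-- ===== Notes on version B (the rewrite author's own statement) =====
-- stated objective: idiomatic
-- what changed: Loop over positions with per-position bounds checks and in-place list mutation is replaced by a single sequence-driven pass: a set of positions and one join over enumerate(seq); invalid positions are ignored because they never equal an index.
import Mathlib
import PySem

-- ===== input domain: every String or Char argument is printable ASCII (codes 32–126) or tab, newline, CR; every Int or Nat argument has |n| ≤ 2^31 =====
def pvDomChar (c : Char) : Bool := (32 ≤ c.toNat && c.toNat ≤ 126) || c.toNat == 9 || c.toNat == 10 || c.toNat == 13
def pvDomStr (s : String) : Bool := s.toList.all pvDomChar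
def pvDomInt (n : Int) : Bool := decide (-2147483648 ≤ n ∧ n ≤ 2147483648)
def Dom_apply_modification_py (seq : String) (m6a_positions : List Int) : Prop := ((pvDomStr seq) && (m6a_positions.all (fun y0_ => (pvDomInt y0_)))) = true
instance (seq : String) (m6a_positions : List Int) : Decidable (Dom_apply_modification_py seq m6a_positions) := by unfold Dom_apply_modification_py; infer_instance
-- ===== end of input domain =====

-- B replaces A's position-driven loop with in-place mutation by a single sequence-driven
-- pass over enumerate(seq) testing set membership (objective: idiomatic; same cost).

-- ===== PORT A =====
-- loop body of A's 'for pos in m6a_positions', as a named helper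
def pvStepA (chars : List Char) (pos : Int) : List Char :=
  if pos < 0 ∨ (chars.length : Int) ≤ pos then chars
  else if PySem.List.pyGetD chars pos ' ' == 'A' then PySem.List.pySetD chars pos '6'
  else chars

def apply_modification_py (seq : String) (m6a_positions : List Int) : String :=
  String.ofList (m6a_positions.foldl pvStepA seq.toList)

-- ===== PORT B =====
def apply_modification_py_alt (seq : String) (m6a_positions : List Int) : String :=
  let mods : PySem.Set Int := PySem.Set.ofList m6a_positions
  String.ofList ((PySem.List.enumerate seq.toList).map
    (fun ic => if PySem.Set.contains mods ic.1 && ic.2 == 'A' then '6' else ic.2))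

-- ===== PRECONDITION & SPEC =====
def Spec_apply_modification_py (seq : String) (m6a_positions : List Int) (out : String) : Prop := out = apply_modification_py_alt seq m6a_positions
instance (seq : String) (m6a_positions : List Int) (out : String) : Decidable (Spec_apply_modification_py seq m6a_positions out) := by unfold Spec_apply_modification_py; infer_instance

-- ===== CLAIM (what is proved, stated in full; the proofs are below) =====
def Claim_equal_apply_modification_py : Prop := ∀ (seq : String) (m6a_positions : List Int), Dom_apply_modification_py seq m6a_positions → Spec_apply_modification_py seq m6a_positions (apply_modification_py seq m6a_positions)

-- ===== LEMMAS AND PROOFS =====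

theorem length_pvStepA (chars : List Char) (pos : Int) :
    (pvStepA chars pos).length = chars.length := by
  unfold pvStepA
  split_ifs <;> simp [PySem.List.length_pySetD]

-- what one loop iteration of A does to each index
theorem pvStepA_getElem? (chars : List Char) (pos : Int) (i : Nat) (h : i < chars.length) :
    (pvStepA chars pos)[i]? =
      some (if (i : Int) = pos ∧ chars[i] = 'A' then '6' else chars[i]) := by
  unfold pvStepA
  by_cases h1 : pos < 0 ∨ (chars.length : Int) ≤ pos
  · rw [if_pos h1, List.getElem?_eq_getElem h, if_neg]
    rintro ⟨rfl, -⟩; omega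
  · have h0 : (0:Int) ≤ pos := by omega
    have hlt : pos.toNat < chars.length := by omega
    rw [if_neg h1, PySem.List.pyGetD_eq_getElem chars ' ' h0 (by omega),
        PySem.List.pySetD_of_nonneg chars '6' h0]
    by_cases hA : chars[pos.toNat] = 'A'
    · rw [if_pos (by simp [hA]), List.getElem?_set]
      by_cases hip : (i : Int) = pos
      · have hpi : pos.toNat = i := by omega
        simp only [hpi, h, if_pos trivial]
        rw [if_pos ⟨hip, hpi ▸ hA⟩]
      · have hpi : ¬ pos.toNat = i := by omega
        rw [if_neg hpi, List.getElem?_eq_getElem h, if_neg (fun hc => hip hc.1)]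
    · rw [if_neg (by simp [hA]), List.getElem?_eq_getElem h, if_neg]
      rintro ⟨hip, hAi⟩
      have hpi : pos.toNat = i := by omega
      exact hA (by simp_all)

-- A's whole loop, characterised as one pass over the enumerated characters
theorem foldA_eq (ps : List Int) (chars : List Char) :
    ps.foldl pvStepA chars =
      (PySem.List.enumerate chars).map
        (fun ic => if ps.contains ic.1 && ic.2 == 'A' then '6' else ic.2) := by
  induction ps generalizing chars with
  | nil => simp [PySem.List.map_snd_enumerate]
  | cons p ps ih =>
    rw [List.foldl_cons, ih (pvStepA chars p)]
    apply List.ext_getElem?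
    intro i
    by_cases hi : i < chars.length
    · rw [List.getElem?_map, List.getElem?_map, PySem.List.getElem?_enumerate,
          PySem.List.getElem?_enumerate, pvStepA_getElem? chars p i hi,
          List.getElem?_eq_getElem hi]
      simp only [Option.map_some, Option.some.injEq, zero_add]
      by_cases hip : (i : Int) = p
      · by_cases hA : chars[i] = 'A'
        · simp [hip, hA]
        · simp [hip, hA]
      · simp [hip]
    · have e1 : chars[i]? = none := List.getElem?_eq_none (by omega)
      have e2 : (pvStepA chars p)[i]? = none := List.getElem?_eq_none (by rw [length_pvStepA]; omega)
      rw [List.getElem?_map, List.getElem?_map, PySem.List.getElem?_enumerate,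
          PySem.List.getElem?_enumerate, e1, e2]
      simp

-- ===== VERDICT (by name: the statement is the Claim_ definition above) =====
theorem apply_modification_py_spec : Claim_equal_apply_modification_py := by
  intro seq ps _
  unfold Spec_apply_modification_py apply_modification_py apply_modification_py_alt
  rw [foldA_eq]
  simp [PySem.Set.contains]
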